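-- pv_equiv track=rewrite | github.com/ufal/edupo | scripts/find_haiku.py | is_extended_haiku
-- ===== SOURCE A (Python) =====
-- def get_syllable_counts(body):
--     """Get list of syllable counts for each verse."""
--     if not body:
--         return None
--
--     syllable_counts = []
--     for verse in body:
--         sections = verse.get('sections', '')
--         if not sections:
--             return None
--         syllable_counts.append(len(sections))
--     return syllable_counts
--
-- def is_extended_haiku(body):
--     """Check if poem has repeating 5-7-5 syllable pattern (at least 2 repetitions)."""
--     syllable_counts = get_syllable_counts(body)
--     if syllable_counts is None:
--         return False
--
--     # Must have at least 6 verses (2 repetitions of 5-7-5)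
--     # and the number of verses must be divisible by 3
--     if len(syllable_counts) < 6 or len(syllable_counts) % 3 != 0:
--         return False
--
--     # Check that each group of 3 verses follows 5-7-5 pattern
--     pattern = [5, 7, 5]
--     for i in range(0, len(syllable_counts), 3):
--         if syllable_counts[i:i+3] != pattern:
--             return False
--
--     return True
-- ===== SOURCE B (Python) =====
-- def is_extended_haiku(body):
--     """Check if poem has repeating 5-7-5 syllable pattern (at least 2 repetitions)."""
--     pattern = (5, 7, 5)
--     n = 0
--     for verse in body:
--         if len(verse.get('sections', '')) != pattern[n % 3]:
--             return False
--         n += 1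
--     return n >= 6 and n % 3 == 0
-- ===== Notes on version B (the rewrite author's own statement) =====
-- stated objective: simpler
-- what changed: Inlined the helper and collapsed A's two passes (build syllable-count list, then re-scan it in slices of 3) into one modular-index pass over the verses that compares each verse's section count to pattern[i % 3] directly, checking length/divisibility once at the end.
import Mathlib
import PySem

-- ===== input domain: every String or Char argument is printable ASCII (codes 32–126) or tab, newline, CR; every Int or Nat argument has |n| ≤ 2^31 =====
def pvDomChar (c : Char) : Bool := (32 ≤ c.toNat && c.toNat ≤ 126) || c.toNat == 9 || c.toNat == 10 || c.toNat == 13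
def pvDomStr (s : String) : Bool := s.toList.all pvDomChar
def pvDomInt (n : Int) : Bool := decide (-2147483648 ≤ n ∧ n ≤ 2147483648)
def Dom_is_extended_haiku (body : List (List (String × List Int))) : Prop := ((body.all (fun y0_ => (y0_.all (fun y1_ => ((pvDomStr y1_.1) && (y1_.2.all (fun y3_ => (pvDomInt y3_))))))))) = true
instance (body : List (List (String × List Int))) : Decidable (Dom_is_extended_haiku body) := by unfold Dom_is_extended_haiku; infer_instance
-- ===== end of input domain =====

-- B inlines A's helper and collapses A's two passes (collect the syllable counts, then
-- re-scan them in slices of three) into one modular-index pass over the verses (objective: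
-- simpler; same cost).

-- ===== PORT A =====
-- loop of get_syllable_counts: appends len(sections) per verse, None on a falsy sections
def pvGscLoop (verses : List (List (String × List Int))) (acc : List Int) : Option (List Int) :=
  match verses with
  | [] => some acc
  | verse :: rest =>
    let sections : List Int := (PySem.Dict.mk verse).getD "sections" []
    if sections.isEmpty then none
    else pvGscLoop rest (acc ++ [(sections.length : Int)])

def get_syllable_counts (body : List (List (String × List Int))) : Option (List Int) :=
  if body.isEmpty then none else pvGscLoop body []

-- the 'for i in range(0, len, 3)' slice check, with early return False
def pvPatLoop (cs : List Int) (idxs : List Int) : Bool :=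
  match idxs with
  | [] => true
  | i :: rest =>
    if PySem.List.slice cs (some i) (some (i + 3)) ≠ [5, 7, 5] then false
    else pvPatLoop cs rest

def is_extended_haiku (body : List (List (String × List Int))) : Bool :=
  match get_syllable_counts body with
  | none => false
  | some cs =>
    if cs.length < 6 || cs.length % 3 != 0 then false
    else pvPatLoop cs (PySem.List.pyRange 0 (cs.length : Int) 3)

-- ===== PORT B =====
-- single pass: n counts verses handled; pattern[n % 3] via pyGetD (n ≥ 0 here, so the
-- index n % 3 ∈ {0,1,2} is always in range and the default 0 is never used)
def pvAltLoop (verses : List (List (String × List Int))) (n : Int) : Bool :=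
  match verses with
  | [] => decide (n ≥ 6 ∧ n % 3 = 0)
  | verse :: rest =>
    if (((PySem.Dict.mk verse).getD "sections" ([] : List Int)).length : Int)
        ≠ PySem.List.pyGetD ([5, 7, 5] : List Int) (n % 3) 0 then false
    else pvAltLoop rest (n + 1)

def is_extended_haiku_alt (body : List (List (String × List Int))) : Bool :=
  pvAltLoop body 0

-- ===== PRECONDITION & SPEC =====
def Spec_is_extended_haiku (body : List (List (String × List Int))) (out : Bool) : Prop := out = is_extended_haiku_alt body
instance (body : List (List (String × List Int))) (out : Bool) : Decidable (Spec_is_extended_haiku body out) := by unfold Spec_is_extended_haiku; infer_instance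

-- ===== CLAIM (what is proved, stated in full; the proofs are below) =====
def Claim_equal_is_extended_haiku : Prop := ∀ (body : List (List (String × List Int))), Dom_is_extended_haiku body → Spec_is_extended_haiku body (is_extended_haiku body)

-- ===== LEMMAS AND PROOFS =====

-- proof-side name for the sections list of a verse
def pvSecs (verse : List (String × List Int)) : List Int :=
  (PySem.Dict.mk verse).getD "sections" []

-- proof-side reference: the 5-7-5 check in chunks of three verses
def pvTrip : List (List (String × List Int)) → Bool
  | [] => true
  | v :: w :: x :: rest =>
    ((pvSecs v).length == 5 && (pvSecs w).length == 7 && (pvSecs x).length == 5) && pvTrip rest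
  | _ => false

theorem pvPyRange3_nil (a b : Int) (h : b ≤ a) : PySem.List.pyRange a b 3 = [] := by
  simp [PySem.List.pyRange, if_neg (not_lt.mpr h)]

theorem pvPyRange3_cons (a b : Int) (h : a < b) :
    PySem.List.pyRange a b 3 = a :: PySem.List.pyRange (a + 3) b 3 := by
  simp [PySem.List.pyRange]
  have hN : (if a < b then ((b - a + 3 - 1) / 3).toNat else 0)
      = (if a + 3 < b then ((b - (a + 3) + 3 - 1) / 3).toNat else 0) + 1 := by
    rw [if_pos h]
    by_cases h3 : a + 3 < b
    · rw [if_pos h3]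
      have e1 : b - a + 3 - 1 = (b - (a + 3) + 3 - 1) + 1 * 3 := by ring
      rw [e1, Int.add_mul_ediv_right _ _ (by norm_num : (3 : ℤ) ≠ 0)]
      have : 0 ≤ (b - (a + 3) + 3 - 1) / 3 := by
        apply Int.ediv_nonneg <;> omega
      omega
    · rw [if_neg h3]
      have h1 : b - a + 3 - 1 ≤ 5 := by omega
      have h2 : 3 ≤ b - a + 3 - 1 := by omega
      interval_cases h' : (b - a + 3 - 1) <;> decide
  rw [hN, List.range_succ_eq_map]
  simp [List.map_map, Function.comp]
  intro k _
  ring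

-- characterization of get_syllable_counts' loop
theorem pvGscLoop_char (body : List (List (String × List Int))) :
    ∀ acc, pvGscLoop body acc =
      if body.all (fun v => !(pvSecs v).isEmpty)
      then some (acc ++ body.map (fun v => ((pvSecs v).length : Int)))
      else none := by
  induction body with
  | nil => intro acc; simp [pvGscLoop]
  | cons v rest ih =>
    intro acc
    have e : pvGscLoop (v :: rest) acc
        = if (pvSecs v).isEmpty = true then none
          else pvGscLoop rest (acc ++ [((pvSecs v).length : Int)]) := rfl
    rw [e]
    by_cases hv : (pvSecs v).isEmpty = true
    · simp [hv]
    · rw [if_neg hv, ih]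
      by_cases hr : rest.all (fun v => !(pvSecs v).isEmpty) = true
      · simp [hv, hr]
      · simp [hv, hr]

theorem pvPat_one (cs : List Int) (i : Int) (rest : List Int) :
    pvPatLoop cs (i :: rest)
      = if PySem.List.slice cs (some i) (some (i + 3)) ≠ [5, 7, 5] then false
        else pvPatLoop cs rest := rfl

-- A's slice loop equals the chunked reference check
theorem pvPatLoop_char (body : List (List (String × List Int))) :
    ∀ (pre : List Int), body.length % 3 = 0 →
      pvPatLoop (pre ++ body.map (fun v => ((pvSecs v).length : Int)))
        (PySem.List.pyRange (pre.length : Int)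
          ((pre.length : Int) + (body.length : Int)) 3) = pvTrip body := by
  induction body using pvTrip.induct with
  | case1 =>
    intro pre _
    rw [show ((pre.length : ℤ) + (([] : List (List (String × List Int))).length : ℤ)) = (pre.length : ℤ) from by simp,
        pvPyRange3_nil _ _ le_rfl]
    simp [pvPatLoop, pvTrip]
  | case2 v w x rest ih =>
    intro pre hlen
    have hr3 : rest.length % 3 = 0 := by simp at hlen; omega
    have hlt : (pre.length : ℤ) < (pre.length : ℤ) + ((v :: w :: x :: rest).length : ℤ) := by
      simp; omega
    rw [pvPyRange3_cons _ _ hlt, pvPat_one]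
    have hslice : PySem.List.slice
        (pre ++ (v :: w :: x :: rest).map (fun v => ((pvSecs v).length : Int)))
        (some (pre.length : ℤ)) (some ((pre.length : ℤ) + 3)) =
        [((pvSecs v).length : ℤ), ((pvSecs w).length : ℤ), ((pvSecs x).length : ℤ)] := by
      rw [show ((pre.length : ℤ) + 3) = ((pre.length : ℤ) + ((3 : ℕ) : ℤ)) from by norm_num,
          PySem.List.slice_natCast_add, List.drop_left]
      simp
    rw [hslice]
    -- the recursive call, repackaged with pre' = pre ++ [a, b, c]
    have hrec : pvPatLoop (pre ++ (v :: w :: x :: rest).map (fun v => ((pvSecs v).length : Int)))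
        (PySem.List.pyRange ((pre.length : ℤ) + 3)
          ((pre.length : ℤ) + ((v :: w :: x :: rest).length : ℤ)) 3) = pvTrip rest := by
      have e1 : pre ++ (v :: w :: x :: rest).map (fun v => ((pvSecs v).length : Int))
          = (pre ++ [((pvSecs v).length : ℤ), ((pvSecs w).length : ℤ), ((pvSecs x).length : ℤ)])
            ++ rest.map (fun v => ((pvSecs v).length : Int)) := by simp
      have e2 : ((pre.length : ℤ) + 3)
          = (((pre ++ [((pvSecs v).length : ℤ), ((pvSecs w).length : ℤ), ((pvSecs x).length : ℤ)]).length : ℤ)) := by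
        simp
      have e3 : ((pre.length : ℤ) + ((v :: w :: x :: rest).length : ℤ))
          = (((pre ++ [((pvSecs v).length : ℤ), ((pvSecs w).length : ℤ), ((pvSecs x).length : ℤ)]).length : ℤ))
            + ((rest.length : ℤ)) := by
        simp; ring
      rw [e1, e2, e3, ih _ hr3]
    rw [hrec]
    have c1 : (((pvSecs v).length : ℤ) = 5) ↔ (pvSecs v).length = 5 := by exact_mod_cast Iff.rfl
    have c2 : (((pvSecs w).length : ℤ) = 7) ↔ (pvSecs w).length = 7 := by exact_mod_cast Iff.rfl
    have c3 : (((pvSecs x).length : ℤ) = 5) ↔ (pvSecs x).length = 5 := by exact_mod_cast Iff.rfl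
    simp only [pvTrip, ne_eq, List.cons.injEq, and_true, c1, c2, c3]
    by_cases e1 : (pvSecs v).length = 5
    · by_cases e2 : (pvSecs w).length = 7
      · by_cases e3 : (pvSecs x).length = 5
        · simp [e1, e2, e3]
        · simp [e1, e2, e3]
      · simp [e1, e2]
    · simp [e1]
  | case3 t h1 h2 =>
    intro pre hlen
    match t, h1, h2 with
    | [], habs, _ => exact absurd rfl habs
    | v :: w :: x :: rest, _, habs => exact absurd rfl (habs v w x rest)
    | [v], _, _ => simp at hlen
    | [v, w], _, _ => simp at hlen

theorem pvAlt_one (v : List (String × List Int)) (rest : List (List (String × List Int))) (n : Int) :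
    pvAltLoop (v :: rest) n
      = if ((pvSecs v).length : Int) ≠ PySem.List.pyGetD ([5, 7, 5] : List Int) (n % 3) 0 then false
        else pvAltLoop rest (n + 1) := rfl

-- B's loop in terms of the chunked reference check and the final length condition
theorem pvAltLoop_char (body : List (List (String × List Int))) :
    ∀ (n : Int), 0 ≤ n → n % 3 = 0 →
      pvAltLoop body n =
        (pvTrip body && decide ((n + (body.length : ℤ)) ≥ 6 ∧ (n + (body.length : ℤ)) % 3 = 0)) := by
  induction body using pvTrip.induct with
  | case1 => intro n h0 h3; simp [pvAltLoop, pvTrip]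
  | case2 v w x rest ih =>
    intro n h0 h3
    have h1 : (n + 1) % 3 = 1 := by omega
    have h2 : (n + 1 + 1) % 3 = 2 := by omega
    have g0 : PySem.List.pyGetD ([5,7,5] : List Int) (0 : Int) 0 = 5 := by decide
    have g1 : PySem.List.pyGetD ([5,7,5] : List Int) (1 : Int) 0 = 7 := by decide
    have g2 : PySem.List.pyGetD ([5,7,5] : List Int) (2 : Int) 0 = 5 := by decide
    rw [pvAlt_one, pvAlt_one, pvAlt_one, h3, h1, h2, g0, g1, g2,
        show (n:ℤ) + 1 + 1 + 1 = n + 3 from by ring,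
        ih (n + 3) (by omega) (by omega)]
    have harr : (n + 3 + ((rest.length : ℤ))) = (n + (((v :: w :: x :: rest).length : ℤ))) := by
      simp; ring
    rw [harr]
    have c1 : (((pvSecs v).length : ℤ) = 5) ↔ (pvSecs v).length = 5 := by exact_mod_cast Iff.rfl
    have c2 : (((pvSecs w).length : ℤ) = 7) ↔ (pvSecs w).length = 7 := by exact_mod_cast Iff.rfl
    have c3 : (((pvSecs x).length : ℤ) = 5) ↔ (pvSecs x).length = 5 := by exact_mod_cast Iff.rfl
    simp only [pvTrip, ne_eq, c1, c2, c3]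
    by_cases e1 : (pvSecs v).length = 5
    · by_cases e2 : (pvSecs w).length = 7
      · by_cases e3 : (pvSecs x).length = 5
        · simp [e1, e2, e3]
        · simp [e1, e2, e3]
      · simp [e1, e2]
    · simp [e1]
  | case3 t h1 h2 =>
    intro n hn0 hn3
    match t, h1, h2 with
    | [v], _, _ =>
      rw [pvAlt_one]
      have hend : pvAltLoop ([] : List (List (String × List Int))) (n + 1) = false := by
        simp [pvAltLoop]; omega
      rw [hend]
      simp [pvTrip]
    | [v, w], _, _ =>
      rw [pvAlt_one, pvAlt_one]
      have hend : pvAltLoop ([] : List (List (String × List Int))) (n + 1 + 1) = false := by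
        simp [pvAltLoop]; omega
      rw [hend]
      simp [pvTrip]
    | [], habs, _ => exact absurd rfl habs
    | v :: w :: x :: rest, _, habs => exact absurd rfl (habs v w x rest)

-- if the chunk check passes, no verse has an empty (or missing) sections list
theorem pvTrip_no_empty (body : List (List (String × List Int))) (h : pvTrip body = true) :
    ∀ v ∈ body, (pvSecs v).isEmpty = false := by
  induction body using pvTrip.induct with
  | case1 => intro v hv; simp at hv
  | case2 v w x rest ih =>
    simp only [pvTrip, Bool.and_eq_true, beq_iff_eq] at h
    intro u hu
    rcases hu with _ | ⟨_, hu⟩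
    · simp; intro he; rw [he] at h; simp at h
    · rcases hu with _ | ⟨_, hu⟩
      · simp; intro he; rw [he] at h; simp at h
      · rcases hu with _ | ⟨_, hu⟩
        · simp; intro he; rw [he] at h; simp at h
        · exact ih h.2 u hu
  | case3 t h1 h2 =>
    match t, h1, h2 with
    | [], habs, _ => exact absurd rfl habs
    | v :: w :: x :: rest, _, habs => exact absurd rfl (habs v w x rest)
    | [v], _, _ => simp [pvTrip] at h
    | [v, w], _, _ => simp [pvTrip] at h

-- ===== VERDICT (by name: the statement is the Claim_ definition above) =====
theorem is_extended_haiku_spec : Claim_equal_is_extended_haiku := by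
  intro body _
  show is_extended_haiku body = is_extended_haiku_alt body
  have hB : is_extended_haiku_alt body
      = (pvTrip body && decide (((body.length : ℤ)) ≥ 6 ∧ ((body.length : ℤ)) % 3 = 0)) := by
    have := pvAltLoop_char body 0 le_rfl rfl
    simpa using this
  by_cases hb : body = []
  · subst hb; decide
  · have hne : body.isEmpty = false := by simp [hb]
    rw [hB]
    unfold is_extended_haiku get_syllable_counts
    rw [hne]
    simp only [Bool.false_eq_true, if_false]
    rw [pvGscLoop_char]
    by_cases hall : body.all (fun v => !(pvSecs v).isEmpty) = true
    · rw [if_pos hall]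
      simp only [List.nil_append, List.length_map]
      by_cases hc : (body.length < 6 || body.length % 3 != 0) = true
      · rw [if_pos hc]
        have : decide (((body.length : ℤ)) ≥ 6 ∧ ((body.length : ℤ)) % 3 = 0) = false := by
          simp only [bne_iff_ne, Bool.or_eq_true, decide_eq_true_eq, ne_eq] at hc
          simp only [decide_eq_false_iff_not, not_and]
          omega
        rw [this, Bool.and_false]
      · rw [if_neg hc]
        simp only [bne_iff_ne, Bool.or_eq_true, decide_eq_true_eq, ne_eq, not_or, not_lt,
          Decidable.not_not] at hc
        have hA := pvPatLoop_char body [] hc.2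
        simp only [List.nil_append, List.length_nil, Nat.cast_zero, zero_add] at hA
        rw [hA]
        have : decide (((body.length : ℤ)) ≥ 6 ∧ ((body.length : ℤ)) % 3 = 0) = true := by
          simp only [decide_eq_true_eq]
          constructor <;> [exact_mod_cast hc.1; omega]
        rw [this, Bool.and_true]
    · rw [if_neg hall]
      have htrip : pvTrip body = false := by
        cases ht : pvTrip body
        · rfl
        · exfalso
          apply hall
          simp only [List.all_eq_true, Bool.not_eq_eq_eq_not, Bool.not_true]
          exact fun v hv => pvTrip_no_empty body ht v hv
      rw [htrip, Bool.false_and]
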